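-- pv_equiv track=rewrite | github.com/sangjianshun/Master-School | algorithm/code/majiang.py | judge_continue
-- ===== SOURCE A (Python) =====
-- def judge_continue(x):
--     #去掉将牌看现在是不是可以凑ABC或者AAA
--     if len(x)==0:
--         return True
--     if len(x)%3!=0:
--         return False
--     if x[0] == x[1] and x[0]==x[2]:
--         return judge_continue(x[3:])
--     if x[0] + 1 not in x or x[0] + 2 not in x:
--         return False
--     else:
--         tmp = x[0]
--         x.remove(tmp)
--         x.remove(tmp + 1)
--         x.remove(tmp + 2)
--         return judge_continue(x)
-- ===== SOURCE B (Python) =====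
-- def judge_continue(x):
--     # run-length encode the (sorted) tiles, then one left-to-right greedy pass
--     # consuming c%3 runs v,v+1,v+2 from each group (triplets absorb the rest)
--     if len(x) % 3 != 0:
--         return False
--     groups = []
--     for t in x:
--         if groups and groups[-1][0] == t:
--             groups[-1] = (t, groups[-1][1] + 1)
--         else:
--             groups.append((t, 1))
--     i = 0
--     while i < len(groups):
--         v, c = groups[i]
--         need = c % 3
--         if need:
--             if (i + 2 >= len(groups) or groups[i + 1][0] != v + 1
--                     or groups[i + 2][0] != v + 2
--                     or groups[i + 1][1] < need or groups[i + 2][1] < need):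
--                 return False
--             groups[i + 1] = (v + 1, groups[i + 1][1] - need)
--             groups[i + 2] = (v + 2, groups[i + 2][1] - need)
--         i += 1
--     return True
-- ===== Notes on version B (the rewrite author's own statement) =====
-- stated objective: alternative
-- what changed: Instead of A's recursion that repeatedly slices the list and deletes tiles with list.remove (a linear scan per removed tile), B run-length encodes the sorted hand once and makes a single left-to-right greedy pass over the groups, consuming count%3 runs v,v+1,v+2 from each group.
-- outside the precondition, e.g. on judge_continue([1, 3, 2]): A returns True, B returns False
import Mathlib
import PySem

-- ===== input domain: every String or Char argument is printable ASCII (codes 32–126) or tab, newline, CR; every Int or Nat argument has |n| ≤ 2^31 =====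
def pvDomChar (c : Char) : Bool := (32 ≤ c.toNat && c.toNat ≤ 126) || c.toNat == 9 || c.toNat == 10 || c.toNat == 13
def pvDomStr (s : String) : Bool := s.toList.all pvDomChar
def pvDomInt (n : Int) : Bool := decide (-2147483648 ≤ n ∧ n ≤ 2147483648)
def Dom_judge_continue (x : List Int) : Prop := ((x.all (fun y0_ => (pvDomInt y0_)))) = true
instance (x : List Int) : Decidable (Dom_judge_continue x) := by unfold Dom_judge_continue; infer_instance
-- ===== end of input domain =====

-- B replaces A's slice/remove recursion by one run-length encoding of the sorted hand
-- plus a single greedy left-to-right pass over the groups (objective: alternative).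
-- A mutates its argument in place (list.remove); B does not — the equivalence proved
-- here is about the RETURN value only.

-- ===== PORT A =====
-- fuel = x.length; each recursive call shortens the list by 3, so the fuel never
-- runs out on the recursion A actually performs (the 0-fuel branch is unreachable).
def judgeA : Nat → List Int → Bool
  | _, [] => true
  | 0, _ :: _ => false
  | fuel + 1, x =>
    if ¬ (PySem.Int.mod (x.length : Int) 3 = 0) then false
    else
      match PySem.List.pyGet? x 0, PySem.List.pyGet? x 1, PySem.List.pyGet? x 2 with
      | some a, some b, some c =>
        if a = b ∧ a = c then
          judgeA fuel (PySem.List.slice x (some 3) none)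
        else if ¬ ((a + 1) ∈ x) ∨ ¬ ((a + 2) ∈ x) then false
        else
          match PySem.List.remove? x a with
          | some x1 =>
            match PySem.List.remove? x1 (a + 1) with
            | some x2 =>
              match PySem.List.remove? x2 (a + 2) with
              | some x3 => judgeA fuel x3
              | none => false
            | none => false
          | none => false
      | _, _, _ => false

def judge_continue (x : List Int) : Bool := judgeA x.length x

-- ===== PORT B =====
-- one step of the group-building loop: merge t into the last group or open a new one
def rleStep (g : List (Int × Int)) (t : Int) : List (Int × Int) :=
  match g.getLast? with
  | some (v, c) => if v = t then g.dropLast ++ [(t, c + 1)] else g ++ [(t, 1)]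
  | none => [(t, 1)]

-- the while loop over the groups, as structural recursion on the suffix starting at
-- index i; the three patterns transcribe the `i + 2 >= len(groups)` bound check
def goLoop : List (Int × Int) → Bool
  | [] => true
  | [(_, c)] =>
    if PySem.Int.mod c 3 ≠ 0 then false else true
  | [(_, c), g1] =>
    if PySem.Int.mod c 3 ≠ 0 then false else goLoop [g1]
  | (v, c) :: (w, d) :: (u, e) :: t2 =>
    let need := PySem.Int.mod c 3
    if need ≠ 0 then
      if w ≠ v + 1 ∨ u ≠ v + 2 ∨ d < need ∨ e < need then false
      else goLoop ((w, d - need) :: (u, e - need) :: t2)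
    else goLoop ((w, d) :: (u, e) :: t2)
termination_by l => l.length
decreasing_by all_goals (simp_all; try omega)

def judge_continue_alt (x : List Int) : Bool :=
  if ¬ (PySem.Int.mod (x.length : Int) 3 = 0) then false
  else goLoop (x.foldl rleStep [])

-- ===== PRECONDITION & SPEC =====
-- Pre_ admits every list whose length is not a multiple of 3 (both programs answer
-- False there at once) and otherwise restricts to non-decreasing lists: the function's
-- domain is a sorted mahjong hand, and on unsorted hands A's head-based recursion
-- returns order-dependent accidental results (e.g. on [1,3,2]) that a count-based
-- single pass does not reproduce.
def Pre_judge_continue (x : List Int) : Prop := x.Pairwise (· ≤ ·) ∨ ¬ (x.length % 3 = 0)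
instance (x : List Int) : Decidable (Pre_judge_continue x) := by unfold Pre_judge_continue; infer_instance

def pvWitness_judge_continue : List Int := [1, 2, 3]

def Spec_judge_continue (x : List Int) (out : Bool) : Prop := out = judge_continue_alt x
instance (x : List Int) (out : Bool) : Decidable (Spec_judge_continue x out) := by unfold Spec_judge_continue; infer_instance

-- ===== CLAIM (what is proved, stated in full; the proofs are below) =====
def Claim_equal_judge_continue : Prop := ∀ (x : List Int), Dom_judge_continue x → Pre_judge_continue x → Spec_judge_continue x (judge_continue x)

-- ===== LEMMAS AND PROOFS =====

-- left-to-right run-length encoding with an open group (v, c); proof-side view of the fold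
def rleAux : Int → Int → List Int → List (Int × Int)
  | v, c, [] => [(v, c)]
  | v, c, t :: ts => if v = t then rleAux v (c + 1) ts else (v, c) :: rleAux t 1 ts

def rleF : List Int → List (Int × Int)
  | [] => []
  | t :: ts => rleAux t 1 ts

lemma foldl_rleStep (xs : List Int) : ∀ (g : List (Int × Int)) (v c : Int),
    List.foldl rleStep (g ++ [(v, c)]) xs = g ++ rleAux v c xs := by
  induction xs with
  | nil => intro g v c; simp [rleAux]
  | cons t ts ih =>
    intro g v c
    simp only [List.foldl_cons, rleStep, List.getLast?_concat, List.dropLast_concat, rleAux]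
    by_cases h : v = t
    · simp [h, ih]
    · simp only [if_neg h]
      rw [show (g ++ [(v, c)]) ++ [(t, 1)] = (g ++ [(v, c)]) ++ [(t, 1)] from rfl, ih]
      simp

lemma rle_eq_rleF (x : List Int) : x.foldl rleStep [] = rleF x := by
  cases x with
  | nil => rfl
  | cons t ts =>
    have := foldl_rleStep ts [] t 1
    simpa [rleStep, rleF] using this

lemma rleAux_head (ys : List Int) : ∀ (v c : Int), ∃ c2 r, rleAux v c ys = (v, c2) :: r := by
  induction ys with
  | nil => intro v c; exact ⟨c, [], rfl⟩
  | cons t ts ih =>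
    intro v c
    by_cases h : v = t
    · subst h
      obtain ⟨c2, r, hr⟩ := ih v (c + 1)
      exact ⟨c2, r, by rw [rleAux, if_pos rfl, hr]⟩
    · exact ⟨c, rleAux t 1 ts, by simp [rleAux, h]⟩

lemma rleAux_replicate (k : Nat) : ∀ (v c : Int) (ys : List Int),
    rleAux v c (List.replicate k v ++ ys) = rleAux v (c + (k : Int)) ys := by
  induction k with
  | zero => intro v c ys; simp
  | succ n ih =>
    intro v c ys
    simp only [List.replicate_succ, List.cons_append, rleAux, if_pos rfl, ih]
    congr 2
    push_cast; ring

lemma rleAux_gt (v c : Int) (ws : List Int) (h : ∀ t ∈ ws, v < t) :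
    rleAux v c ws = (v, c) :: rleF ws := by
  cases ws with
  | nil => rfl
  | cons w ws2 =>
    have : v ≠ w := by have := h w (by simp); omega
    simp [rleAux, rleF, this]

lemma rleF_replicate_append (k : Nat) (hk : 1 ≤ k) (v : Int) (ys : List Int) :
    rleF (List.replicate k v ++ ys) = rleAux v (k : Int) ys := by
  obtain ⟨n, rfl⟩ : ∃ n, k = n + 1 := ⟨k - 1, by omega⟩
  simp only [List.replicate_succ, List.cons_append, rleF, rleAux_replicate]
  congr 2
  push_cast; ring

lemma rleF_head_gt (ws : List Int) (b : Int) (h : ∀ t ∈ ws, b < t) :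
    ∀ q ∈ (rleF ws).head?, b < q.1 := by
  cases ws with
  | nil => simp [rleF]
  | cons w ws2 =>
    obtain ⟨c2, r, hr⟩ := rleAux_head ws2 w 1
    simp only [rleF, hr]
    intro q hq
    simp only [List.head?_cons, Option.mem_some_iff] at hq
    subst hq
    exact h w (by simp)

lemma goLoop_zero (v : Int) (r : List (Int × Int)) : goLoop ((v, 0) :: r) = goLoop r := by
  rcases r with _ | ⟨⟨w, d⟩, _ | ⟨⟨u, e⟩, t2⟩⟩ <;> simp [goLoop]

lemma mod_add3 (c : Int) : PySem.Int.mod (c + 3) 3 = PySem.Int.mod c 3 := by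
  rw [PySem.Int.mod_eq_emod_of_pos (by omega), PySem.Int.mod_eq_emod_of_pos (by omega)]
  omega

lemma goLoop_add3 (ts : List Int) : ∀ (v c : Int),
    goLoop (rleAux v (c + 3) ts) = goLoop (rleAux v c ts) := by
  induction ts with
  | nil =>
    intro v c
    simp only [rleAux, goLoop, mod_add3]
  | cons t ts ih =>
    intro v c
    by_cases h : v = t
    · simp only [rleAux, if_pos h]
      have := ih v (c + 1)
      rw [show c + 3 + 1 = (c + 1) + 3 by ring, this]
    · simp only [rleAux, if_neg h]
      obtain ⟨c2, r, hr⟩ := rleAux_head ts t 1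
      rw [hr]
      rcases r with _ | ⟨⟨u, e⟩, t2⟩ <;>
        simp only [goLoop, mod_add3]

lemma goLoop_three (rest : List Int) (a : Int) :
    goLoop (rleAux a 3 rest) = goLoop (rleF rest) := by
  cases rest with
  | nil =>
    show goLoop [(a, 3)] = goLoop []
    simp [goLoop]
  | cons t ts =>
    by_cases h : a = t
    · subst h
      rw [rleAux, if_pos rfl, rleF, show (3:Int) + 1 = 1 + 3 by ring, goLoop_add3 ts a 1]
    · simp only [rleAux, if_neg h, rleF]
      obtain ⟨c2, r, hr⟩ := rleAux_head ts t 1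
      rw [hr]
      rcases r with _ | ⟨⟨u, e⟩, t2⟩ <;> simp [goLoop]

lemma goLoop_cons_false (v c : Int) (r : List (Int × Int))
    (hc : PySem.Int.mod c 3 ≠ 0) (hr : ∀ q ∈ r.head?, q.1 ≠ v + 1) :
    goLoop ((v, c) :: r) = false := by
  have hdvd : ¬ (3 ∣ c) := fun h => hc ((PySem.Int.mod_eq_zero_iff_dvd c 3).2 h)
  rcases r with _ | ⟨⟨w, d⟩, _ | ⟨⟨u, e⟩, t2⟩⟩
  · simp [goLoop, hdvd]
  · simp [goLoop, hdvd]
  · have hw : w ≠ v + 1 := hr (w, d) (by simp)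
    simp [goLoop, hdvd, hw]

lemma goLoop_cons2_false (v c w d : Int) (r : List (Int × Int))
    (hc : PySem.Int.mod c 3 ≠ 0) (hr : ∀ q ∈ r.head?, q.1 ≠ v + 2) :
    goLoop ((v, c) :: (w, d) :: r) = false := by
  have hdvd : ¬ (3 ∣ c) := fun h => hc ((PySem.Int.mod_eq_zero_iff_dvd c 3).2 h)
  rcases r with _ | ⟨⟨u, e⟩, t2⟩
  · simp [goLoop, hdvd]
  · have hu : u ≠ v + 2 := hr (u, e) (by simp)
    simp [goLoop, hdvd, hu]

lemma goLoop_d_lt (v c w d : Int) (r : List (Int × Int))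
    (hc : PySem.Int.mod c 3 ≠ 0) (hd : d < PySem.Int.mod c 3) :
    goLoop ((v, c) :: (w, d) :: r) = false := by
  have hdvd : ¬ (3 ∣ c) := fun h => hc ((PySem.Int.mod_eq_zero_iff_dvd c 3).2 h)
  have hd' : d < c % 3 := by rwa [PySem.Int.mod_eq_emod_of_pos (by omega)] at hd
  rcases r with _ | ⟨⟨u, e⟩, t2⟩
  · simp [goLoop, hdvd]
  · simp [goLoop, hdvd]
    omega

lemma goLoop_e_lt (v c w d u e : Int) (r : List (Int × Int))
    (hc : PySem.Int.mod c 3 ≠ 0) (he : e < PySem.Int.mod c 3) :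
    goLoop ((v, c) :: (w, d) :: (u, e) :: r) = false := by
  have hdvd : ¬ (3 ∣ c) := fun h => hc ((PySem.Int.mod_eq_zero_iff_dvd c 3).2 h)
  have he' : e < c % 3 := by rwa [PySem.Int.mod_eq_emod_of_pos (by omega)] at he
  simp [goLoop, hdvd]
  omega

lemma goLoop_mid_zero (v k : Int) (r : List (Int × Int))
    (hr : ∀ q ∈ r.head?, v + 1 < q.1) :
    goLoop ((v, k) :: (v + 1, 0) :: r) = goLoop ((v, k) :: r) := by
  have hme : PySem.Int.mod k 3 = k % 3 := PySem.Int.mod_eq_emod_of_pos (by omega)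
  by_cases hk : k % 3 = 0
  · have h3 : 3 ∣ k := by omega
    rcases r with _ | ⟨⟨u, e⟩, t2⟩
    · simp [goLoop, h3]
    · rw [show goLoop ((v, k) :: (v + 1, 0) :: (u, e) :: t2)
            = goLoop ((v + 1, 0) :: (u, e) :: t2) by simp [goLoop, h3, hme, hk]]
      rw [goLoop_zero]
      rcases t2 with _ | ⟨⟨u2, e2⟩, t3⟩ <;> simp [goLoop, h3, hme, hk]
  · have hmod : PySem.Int.mod k 3 ≠ 0 := by rw [hme]; exact hk
    have hpos : 0 < k % 3 := by omega
    rcases r with _ | ⟨⟨u, e⟩, t2⟩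
    · have hdvd : ¬ (3 ∣ k) := by omega
      simp [goLoop, hdvd]
    · have hu : u ≠ v + 1 := by have := hr (u, e) (by simp); omega
      rw [show goLoop ((v, k) :: (v + 1, 0) :: (u, e) :: t2) = false by
            have hdvd : ¬ (3 ∣ k) := by omega
            simp [goLoop, hdvd, hme]
            omega]
      exact (goLoop_cons_false v k ((u, e) :: t2) hmod (by simpa using hu)).symm
lemma sorted_decomp (xs : List Int) : ∀ (a : Int), (a :: xs).Pairwise (· ≤ ·) →
    ∃ (c : Nat) (ys : List Int), 1 ≤ c ∧ a :: xs = List.replicate c a ++ ys ∧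
      ys.Pairwise (· ≤ ·) ∧ ∀ t ∈ ys, a < t := by
  induction xs with
  | nil =>
    intro a _
    exact ⟨1, [], le_rfl, by simp, by simp, by simp⟩
  | cons b xs ih =>
    intro a h
    rw [List.pairwise_cons] at h
    obtain ⟨hle, htail⟩ := h
    by_cases hab : a = b
    · subst hab
      obtain ⟨c, ys, hc, heq, hys, hgt⟩ := ih a htail
      exact ⟨c + 1, ys, by omega, by simp [List.replicate_succ, ← heq], hys, hgt⟩
    · refine ⟨1, b :: xs, le_rfl, by simp, htail, ?_⟩
      intro t ht
      have hab' : a < b := lt_of_le_of_ne (hle b (by simp)) hab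
      rcases List.mem_cons.1 ht with rfl | ht'
      · exact hab'
      · have := (List.pairwise_cons.1 htail).1 t ht'
        omega

lemma mem_min_decomp (ys : List Int) (a : Int) (hs : ys.Pairwise (· ≤ ·))
    (hgt : ∀ t ∈ ys, a < t) (hm : (a + 1) ∈ ys) :
    ∃ (d : Nat) (zs : List Int), 1 ≤ d ∧ ys = List.replicate d (a + 1) ++ zs ∧
      zs.Pairwise (· ≤ ·) ∧ ∀ t ∈ zs, a + 1 < t := by
  cases ys with
  | nil => simp at hm
  | cons y ys2 =>
    have hy : y = a + 1 := by
      have h1 : a < y := hgt y (by simp)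
      rcases List.mem_cons.1 hm with h | h
      · omega
      · have := (List.pairwise_cons.1 hs).1 _ h
        omega
    subst hy
    exact sorted_decomp ys2 (a + 1) hs

lemma remove?_append_not_mem (p : List Int) : ∀ (l : List Int) (v : Int), v ∉ p →
    PySem.List.remove? (p ++ l) v = (PySem.List.remove? l v).map (p ++ ·) := by
  induction p with
  | nil => intro l v _; simp [Option.map_id']
  | cons q p' ih =>
    intro l v hv
    have hq : q ≠ v := by rintro rfl; exact hv (by simp)
    rw [List.cons_append, PySem.List.remove?_cons_of_ne (p' ++ l) hq,
      ih l v (fun h => hv (by simp [h]))]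
    rw [Option.map_map]
    rfl
lemma len_mod3 (L : Nat) : (PySem.Int.mod (L : Int) 3 = 0) ↔ L % 3 = 0 := by
  rw [PySem.Int.mod_eq_emod_of_pos (by omega)]
  omega

lemma alt_eq (x : List Int) : judge_continue_alt x =
    if x.length % 3 = 0 then goLoop (rleF x) else false := by
  unfold judge_continue_alt
  rw [rle_eq_rleF]
  by_cases h : x.length % 3 = 0
  · rw [if_pos h, if_neg (by simp; omega)]
  · rw [if_neg h, if_pos (by simp; omega)]

lemma rleF_head_mem (ws : List Int) : ∀ q ∈ (rleF ws).head?, q.1 ∈ ws := by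
  cases ws with
  | nil => simp [rleF]
  | cons w ws2 =>
    obtain ⟨c2, r, hr⟩ := rleAux_head ws2 w 1
    simp only [rleF, hr, List.head?_cons, Option.mem_some_iff]
    rintro q rfl
    simp

lemma goLoop_run (v c d e : Int) (r : List (Int × Int))
    (hc : PySem.Int.mod c 3 ≠ 0) (hd : PySem.Int.mod c 3 ≤ d) (he : PySem.Int.mod c 3 ≤ e) :
    goLoop ((v, c) :: (v + 1, d) :: (v + 2, e) :: r)
      = goLoop ((v + 1, d - PySem.Int.mod c 3) :: (v + 2, e - PySem.Int.mod c 3) :: r) := by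
  have hdvd : ¬ (3 ∣ c) := fun h => hc ((PySem.Int.mod_eq_zero_iff_dvd c 3).2 h)
  have hme : PySem.Int.mod c 3 = c % 3 := PySem.Int.mod_eq_emod_of_pos (by omega)
  rw [hme] at hd he ⊢
  simp [goLoop, hdvd, not_lt.2 hd, not_lt.2 he]

lemma pyGet012 (p1 p2 p3 : Int) (rest : List Int) :
    PySem.List.pyGet? (p1 :: p2 :: p3 :: rest) 0 = some p1 ∧
    PySem.List.pyGet? (p1 :: p2 :: p3 :: rest) 1 = some p2 ∧
    PySem.List.pyGet? (p1 :: p2 :: p3 :: rest) 2 = some p3 := by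
  refine ⟨PySem.List.pyGet?_zero_cons _ _, ?_, ?_⟩
  · simpa using PySem.List.pyGet?_ofNat (p1 :: p2 :: p3 :: rest) 1 (by simp)
  · simpa using PySem.List.pyGet?_ofNat (p1 :: p2 :: p3 :: rest) 2 (by simp)


lemma judgeA_nil (fuel : Nat) : judgeA fuel [] = true := by
  cases fuel <;> rfl

lemma alt_nil : judge_continue_alt [] = true := by
  rw [alt_eq]
  simp [rleF, goLoop]

lemma judgeA_eq (fuel : Nat) : ∀ (x : List Int), x.length ≤ fuel → x.Pairwise (· ≤ ·) →
    judgeA fuel x = judge_continue_alt x := by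
  induction fuel with
  | zero =>
    intro x hlen _
    have hx : x = [] := List.length_eq_zero_iff.1 (by omega)
    subst hx
    rw [judgeA_nil, alt_nil]
  | succ f ih =>
    intro x hlen hsort
    rcases x with _ | ⟨p1, xs⟩
    · rw [judgeA_nil, alt_nil]
    · rw [alt_eq]
      by_cases hmod : (p1 :: xs).length % 3 = 0
      case neg =>
        rw [if_neg hmod]
        have hm : ¬ (PySem.Int.mod (((p1 :: xs).length : Nat) : Int) 3 = 0) := by
          rw [len_mod3]; exact hmod
        rw [judgeA, if_pos hm]
        simp
      case pos =>
        rw [if_pos hmod]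
        have hlen3 : 3 ≤ (p1 :: xs).length := by
          simp only [List.length_cons]
          simp only [List.length_cons] at hmod
          omega
        obtain ⟨p2, p3, rest, rfl⟩ : ∃ p2 p3 rest, xs = p2 :: p3 :: rest := by
          rcases xs with _ | ⟨p2, _ | ⟨p3, rest⟩⟩ <;> simp at hlen3 <;> try omega
          exact ⟨p2, p3, _, rfl⟩
        have hm : PySem.Int.mod (((p1 :: p2 :: p3 :: rest).length : Nat) : Int) 3 = 0 := by
          rw [len_mod3]; exact hmod
        obtain ⟨hg0, hg1, hg2⟩ := pyGet012 p1 p2 p3 rest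
        by_cases htr : p1 = p2 ∧ p1 = p3
        case pos =>
          obtain ⟨h12, h13⟩ := htr
          subst h12; subst h13
          have hslice : PySem.List.slice (p1 :: p1 :: p1 :: rest) (some 3) none = rest := by
            rw [PySem.List.slice_from (p1 :: p1 :: p1 :: rest) (by norm_num : (0:Int) ≤ 3)]
            rfl
          have hrs : rest.Pairwise (· ≤ ·) := hsort.of_cons.of_cons.of_cons
          have hrl : rest.length ≤ f := by
            simp only [List.length_cons] at hlen; omega
          have hrm : rest.length % 3 = 0 := by
            simp only [List.length_cons] at hmod; omega
          rw [show judgeA (f + 1) (p1 :: p1 :: p1 :: rest)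
                = judgeA f (PySem.List.slice (p1 :: p1 :: p1 :: rest) (some 3) none) by
              rw [judgeA, if_neg (not_not_intro hm), hg0, hg1, hg2]
              · simp
              · simp]
          rw [hslice, ih rest hrl hrs, alt_eq, if_pos hrm]
          have h3 : rleF (p1 :: p1 :: p1 :: rest) = rleAux p1 3 rest := by
            show rleAux p1 1 (p1 :: p1 :: rest) = rleAux p1 3 rest
            rw [rleAux, if_pos rfl, rleAux, if_pos rfl]
            norm_num
          rw [h3, goLoop_three]
        case neg =>
          obtain ⟨c0, ys, hc0, hxe, hys, hgt⟩ := sorted_decomp (p2 :: p3 :: rest) p1 hsort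
          have hc0le : c0 ≤ 2 := by
            by_contra hgt3
            obtain ⟨m, rfl⟩ : ∃ m, c0 = m + 3 := ⟨c0 - 3, by omega⟩
            simp [List.replicate_succ] at hxe
            exact htr ⟨hxe.1.symm, hxe.2.1.symm⟩
          have hsubys : ∀ t ∈ ys, t ∈ p1 :: p2 :: p3 :: rest := by
            intro t ht; rw [hxe]; exact List.mem_append_right _ ht
          by_cases h1 : (p1 + 1) ∈ (p1 :: p2 :: p3 :: rest)
          case neg =>
            rw [show judgeA (f + 1) (p1 :: p2 :: p3 :: rest) = false by
              rw [judgeA, if_neg (not_not_intro hm), hg0, hg1, hg2]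
              · simp only []
                rw [if_neg htr, if_pos (Or.inl h1)]
              · simp]
            symm
            rw [hxe, rleF_replicate_append c0 hc0, rleAux_gt p1 (c0 : Int) ys hgt]
            apply goLoop_cons_false
            · interval_cases c0 <;> decide
            · intro q hq
              intro hqeq
              exact h1 (hqeq ▸ hsubys q.1 (rleF_head_mem ys q hq))
          case pos =>
            have h1y : (p1 + 1) ∈ ys := by
              rw [hxe] at h1
              rcases List.mem_append.1 h1 with h | h
              · have := List.eq_of_mem_replicate h; omega
              · exact h
            obtain ⟨d, zs, hd, hyse, hzs, hzgt⟩ := mem_min_decomp ys p1 hys hgt h1y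
            have hsubzs : ∀ t ∈ zs, t ∈ p1 :: p2 :: p3 :: rest := by
              intro t ht
              exact hsubys t (by rw [hyse]; exact List.mem_append_right _ ht)
            have hRx1 : rleF (p1 :: p2 :: p3 :: rest)
                = (p1, (c0 : Int)) :: (p1 + 1, (d : Int)) :: rleF zs := by
              rw [hxe, rleF_replicate_append c0 hc0, rleAux_gt p1 (c0 : Int) ys hgt,
                hyse, rleF_replicate_append d hd, rleAux_gt (p1 + 1) (d : Int) zs hzgt]
            by_cases h2 : (p1 + 2) ∈ (p1 :: p2 :: p3 :: rest)
            case neg =>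
              rw [show judgeA (f + 1) (p1 :: p2 :: p3 :: rest) = false by
                rw [judgeA, if_neg (not_not_intro hm), hg0, hg1, hg2]
                · simp only []
                  rw [if_neg htr, if_pos (Or.inr h2)]
                · simp]
              symm
              rw [hRx1]
              apply goLoop_cons2_false
              · interval_cases c0 <;> decide
              · intro q hq hqeq
                exact h2 (hqeq ▸ hsubzs q.1 (rleF_head_mem zs q hq))
            case pos =>
              have h2z : (p1 + 1 + 1) ∈ zs := by
                rw [hxe] at h2
                rcases List.mem_append.1 h2 with h | h
                · have := List.eq_of_mem_replicate h; omega
                · rw [hyse] at h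
                  rcases List.mem_append.1 h with h | h
                  · have := List.eq_of_mem_replicate h; omega
                  · rw [show p1 + 1 + 1 = p1 + 2 by ring]; exact h
              obtain ⟨e, ws, he, hzse, hws, hwgt⟩ := mem_min_decomp zs (p1 + 1) hzs hzgt h2z
              rw [show p1 + 1 + 1 = p1 + 2 by ring] at hzse hwgt
              obtain ⟨m, rfl⟩ : ∃ m, c0 = m + 1 := ⟨c0 - 1, by omega⟩
              obtain ⟨dm, rfl⟩ : ∃ dm, d = dm + 1 := ⟨d - 1, by omega⟩
              obtain ⟨em, rfl⟩ : ∃ em, e = em + 1 := ⟨e - 1, by omega⟩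
              have hxx : p1 :: p2 :: p3 :: rest
                  = List.replicate (m + 1) p1 ++ (List.replicate (dm + 1) (p1 + 1)
                    ++ (List.replicate (em + 1) (p1 + 2) ++ ws)) := by
                rw [hxe, hyse, hzse]
              -- the three removals
              have hr1 : PySem.List.remove? (p1 :: p2 :: p3 :: rest) p1
                  = some (List.replicate m p1 ++ (List.replicate (dm + 1) (p1 + 1)
                    ++ (List.replicate (em + 1) (p1 + 2) ++ ws))) := by
                rw [hxx, List.replicate_succ, List.cons_append, PySem.List.remove?_cons_self]
              have hnm1 : p1 + 1 ∉ List.replicate m p1 := by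
                intro h; have := List.eq_of_mem_replicate h; omega
              have hr2 : PySem.List.remove? (List.replicate m p1 ++ (List.replicate (dm + 1) (p1 + 1)
                    ++ (List.replicate (em + 1) (p1 + 2) ++ ws))) (p1 + 1)
                  = some (List.replicate m p1 ++ (List.replicate dm (p1 + 1)
                    ++ (List.replicate (em + 1) (p1 + 2) ++ ws))) := by
                rw [remove?_append_not_mem (List.replicate m p1) _ _ hnm1,
                  List.replicate_succ, List.cons_append, PySem.List.remove?_cons_self]
                rfl
              have hnm2 : p1 + 2 ∉ List.replicate m p1 ++ List.replicate dm (p1 + 1) := by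
                intro h
                rcases List.mem_append.1 h with h | h <;>
                  (have := List.eq_of_mem_replicate h; omega)
              have hr3 : PySem.List.remove? (List.replicate m p1 ++ (List.replicate dm (p1 + 1)
                    ++ (List.replicate (em + 1) (p1 + 2) ++ ws))) (p1 + 2)
                  = some (List.replicate m p1 ++ (List.replicate dm (p1 + 1)
                    ++ (List.replicate em (p1 + 2) ++ ws))) := by
                rw [show List.replicate m p1 ++ (List.replicate dm (p1 + 1)
                      ++ (List.replicate (em + 1) (p1 + 2) ++ ws))
                    = (List.replicate m p1 ++ List.replicate dm (p1 + 1))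
                      ++ (List.replicate (em + 1) (p1 + 2) ++ ws) by simp [List.append_assoc],
                  remove?_append_not_mem _ _ _ hnm2, List.replicate_succ, List.cons_append,
                  PySem.List.remove?_cons_self]
                simp [List.append_assoc]
              rw [show judgeA (f + 1) (p1 :: p2 :: p3 :: rest)
                  = judgeA f (List.replicate m p1 ++ (List.replicate dm (p1 + 1)
                    ++ (List.replicate em (p1 + 2) ++ ws))) by
                rw [judgeA, if_neg (not_not_intro hm), hg0, hg1, hg2]
                · simp only []
                  rw [if_neg htr, if_neg (not_or.2 ⟨not_not_intro h1, not_not_intro h2⟩)]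
                  simp only [hr1, hr2, hr3]
                · simp]
              -- lengths
              have hlens : (p1 :: p2 :: p3 :: rest).length
                  = (m + 1) + ((dm + 1) + ((em + 1) + ws.length)) := by
                rw [hxx]; simp
              set x3 : List Int := List.replicate m p1 ++ (List.replicate dm (p1 + 1)
                  ++ (List.replicate em (p1 + 2) ++ ws)) with hx3def
              have hx3len : x3.length = m + (dm + (em + ws.length)) := by
                rw [hx3def]; simp
              have hx3sub : List.Sublist x3 (p1 :: p2 :: p3 :: rest) := by
                rw [hxx]
                exact ((List.replicate_sublist_replicate p1).2 (Nat.le_succ m)).append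
                  (((List.replicate_sublist_replicate (p1 + 1)).2 (Nat.le_succ dm)).append
                    (((List.replicate_sublist_replicate (p1 + 2)).2 (Nat.le_succ em)).append
                      (List.Sublist.refl ws)))
              have hx3s : x3.Pairwise (· ≤ ·) := hsort.sublist hx3sub
              have hx3l : x3.length ≤ f := by
                rw [hlens] at hlen
                rw [hx3len]
                omega
              have hx3m : x3.length % 3 = 0 := by
                rw [hlens] at hmod
                rw [hx3len]
                omega
              rw [ih x3 hx3l hx3s, alt_eq, if_pos hx3m]
              -- both sides are goLoop of the two rle's
              have hheadws : ∀ q ∈ (rleF ws).head?, p1 + 2 < q.1 := rleF_head_gt ws (p1 + 2) hwgt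
              have hRx : rleF (p1 :: p2 :: p3 :: rest)
                  = (p1, ((m : Int) + 1)) :: (p1 + 1, ((dm : Int) + 1))
                    :: (p1 + 2, ((em : Int) + 1)) :: rleF ws := by
                rw [hxx, rleF_replicate_append (m + 1) (by omega),
                  rleAux_gt p1 _ _ (by rw [hyse, hzse] at hgt; exact hgt),
                  rleF_replicate_append (dm + 1) (by omega),
                  rleAux_gt (p1 + 1) _ _ (by rw [hzse] at hzgt; exact hzgt),
                  rleF_replicate_append (em + 1) (by omega),
                  rleAux_gt (p1 + 2) _ _ hwgt]
                push_cast
                ring_nf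
              rw [hRx]
              have hm2 : m ≤ 1 := by omega
              interval_cases m
              · -- c0 = 1 : one run is consumed
                rw [show ((0 : Nat) : Int) + 1 = 1 by norm_num]
                rw [show goLoop ((p1, 1) :: (p1 + 1, ((dm : Int) + 1))
                      :: (p1 + 2, ((em : Int) + 1)) :: rleF ws)
                    = goLoop ((p1 + 1, (dm : Int)) :: (p1 + 2, (em : Int)) :: rleF ws) by
                  have := goLoop_run p1 1 ((dm : Int) + 1) ((em : Int) + 1) (rleF ws)
                    (by decide) (by rw [show PySem.Int.mod (1:Int) 3 = 1 from by decide]; omega)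
                    (by rw [show PySem.Int.mod (1:Int) 3 = 1 from by decide]; omega)
                  rw [this]
                  norm_num [show PySem.Int.mod (1:Int) 3 = 1 from by decide]]
                rcases Nat.eq_zero_or_pos dm with rfl | hdm <;>
                  rcases Nat.eq_zero_or_pos em with rfl | hem
                · -- x3 = ws
                  rw [show x3 = ws by rw [hx3def]; simp]
                  rw [show ((0:Nat):Int) = 0 by norm_num, goLoop_zero, goLoop_zero]
                · rw [show x3 = List.replicate em (p1 + 2) ++ ws by rw [hx3def]; simp]
                  rw [rleF_replicate_append em hem, rleAux_gt (p1 + 2) _ _ hwgt]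
                  rw [show ((0:Nat):Int) = 0 by norm_num, goLoop_zero]
                · rw [show x3 = List.replicate dm (p1 + 1) ++ ws by rw [hx3def]; simp]
                  rw [rleF_replicate_append dm hdm,
                    rleAux_gt (p1 + 1) _ _ (fun t ht => by have := hwgt t ht; omega)]
                  rw [show ((0:Nat):Int) = 0 by norm_num]
                  have := goLoop_mid_zero (p1 + 1) (dm : Int) (rleF ws)
                    (fun q hq => by have := hheadws q hq; omega)
                  rw [show p1 + 1 + 1 = p1 + 2 by ring] at this
                  exact this.symm
                · rw [show x3 = List.replicate dm (p1 + 1) ++ (List.replicate em (p1 + 2) ++ ws)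
                      by rw [hx3def]; simp]
                  rw [rleF_replicate_append dm hdm,
                    rleAux_gt (p1 + 1) _ _ (fun t ht => by
                      rcases List.mem_append.1 ht with h | h
                      · have := List.eq_of_mem_replicate h; omega
                      · have := hwgt t h; omega),
                    rleF_replicate_append em hem, rleAux_gt (p1 + 2) _ _ hwgt]
              · -- c0 = 2 : two runs are consumed
                rw [show ((1 : Nat) : Int) + 1 = 2 by norm_num]
                by_cases hdm : 1 ≤ dm
                case neg =>
                  -- dm = 0 : second run is impossible; both sides are false
                  have hdm0 : dm = 0 := by omega
                  subst hdm0
                  rw [show goLoop ((p1, 2) :: (p1 + 1, ((0:Nat) : Int) + 1)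
                        :: (p1 + 2, ((em : Int) + 1)) :: rleF ws) = false by
                    apply goLoop_d_lt
                    · decide
                    · norm_num [show PySem.Int.mod (2:Int) 3 = 2 from by decide]]
                  rw [show x3 = List.replicate 1 p1 ++ (List.replicate em (p1 + 2) ++ ws)
                      by rw [hx3def]; simp]
                  rw [rleF_replicate_append 1 le_rfl,
                    rleAux_gt p1 _ _ (fun t ht => by
                      rcases List.mem_append.1 ht with h | h
                      · have := List.eq_of_mem_replicate h; omega
                      · have := hwgt t h; omega)]
                  apply goLoop_cons_false
                  · decide
                  · rcases Nat.eq_zero_or_pos em with rfl | hem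
                    · rw [show List.replicate 0 (p1 + 2) ++ ws = ws by simp]
                      intro q hq
                      have := hheadws q hq; omega
                    · rw [rleF_replicate_append em hem, rleAux_gt (p1 + 2) _ _ hwgt]
                      intro q hq
                      simp only [List.head?_cons, Option.mem_some_iff] at hq
                      subst hq; omega
                case pos =>
                  by_cases hem : 1 ≤ em
                  case neg =>
                    -- em = 0 : both sides are false
                    have hem0 : em = 0 := by omega
                    subst hem0
                    rw [show goLoop ((p1, 2) :: (p1 + 1, ((dm : Int) + 1))
                          :: (p1 + 2, ((0:Nat) : Int) + 1) :: rleF ws) = false by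
                      apply goLoop_e_lt
                      · decide
                      · norm_num [show PySem.Int.mod (2:Int) 3 = 2 from by decide]]
                    rw [show x3 = List.replicate 1 p1 ++ (List.replicate dm (p1 + 1) ++ ws)
                        by rw [hx3def]; simp]
                    rw [rleF_replicate_append 1 le_rfl,
                      rleAux_gt p1 _ _ (fun t ht => by
                        rcases List.mem_append.1 ht with h | h
                        · have := List.eq_of_mem_replicate h; omega
                        · have := hwgt t h; omega),
                      rleF_replicate_append dm hdm,
                      rleAux_gt (p1 + 1) _ _ (fun t ht => by have := hwgt t ht; omega)]
                    apply goLoop_cons2_false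
                    · decide
                    · intro q hq
                      have := rleF_head_gt ws (p1 + 2) hwgt q hq
                      omega
                  case pos =>
                    -- dm, em ≥ 1 : the same two groups remain on both sides
                    rw [show goLoop ((p1, 2) :: (p1 + 1, ((dm : Int) + 1))
                          :: (p1 + 2, ((em : Int) + 1)) :: rleF ws)
                        = goLoop ((p1 + 1, (dm : Int) - 1) :: (p1 + 2, (em : Int) - 1) :: rleF ws) by
                      have := goLoop_run p1 2 ((dm : Int) + 1) ((em : Int) + 1) (rleF ws)
                        (by decide)
                        (by rw [show PySem.Int.mod (2:Int) 3 = 2 from by decide]; omega)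
                        (by rw [show PySem.Int.mod (2:Int) 3 = 2 from by decide]; omega)
                      rw [this]
                      norm_num [show PySem.Int.mod (2:Int) 3 = 2 from by decide]
                      ring_nf]
                    symm
                    rw [show x3 = List.replicate 1 p1 ++ (List.replicate dm (p1 + 1)
                        ++ (List.replicate em (p1 + 2) ++ ws)) by rw [hx3def]]
                    rw [rleF_replicate_append 1 le_rfl,
                      rleAux_gt p1 _ _ (fun t ht => by
                        rcases List.mem_append.1 ht with h | h
                        · have := List.eq_of_mem_replicate h; omega
                        · rcases List.mem_append.1 h with h | h
                          · have := List.eq_of_mem_replicate h; omega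
                          · have := hwgt t h; omega),
                      rleF_replicate_append dm hdm,
                      rleAux_gt (p1 + 1) _ _ (fun t ht => by
                        rcases List.mem_append.1 ht with h | h
                        · have := List.eq_of_mem_replicate h; omega
                        · have := hwgt t h; omega),
                      rleF_replicate_append em hem, rleAux_gt (p1 + 2) _ _ hwgt]
                    rw [show goLoop ((p1, ((1:Nat) : Int)) :: (p1 + 1, (dm : Int))
                          :: (p1 + 2, (em : Int)) :: rleF ws)
                        = goLoop ((p1 + 1, (dm : Int) - 1) :: (p1 + 2, (em : Int) - 1) :: rleF ws) by
                      have := goLoop_run p1 1 ((dm : Int)) ((em : Int)) (rleF ws)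
                        (by decide)
                        (by rw [show PySem.Int.mod (1:Int) 3 = 1 from by decide]; omega)
                        (by rw [show PySem.Int.mod (1:Int) 3 = 1 from by decide]; omega)
                      rw [show ((1:Nat) : Int) = 1 by norm_num, this]
                      norm_num [show PySem.Int.mod (1:Int) 3 = 1 from by decide]]

lemma judge_badlen (x : List Int) (h : ¬ x.length % 3 = 0) :
    judge_continue x = judge_continue_alt x := by
  rw [alt_eq, if_neg h]
  unfold judge_continue
  rcases x with _ | ⟨p1, xs⟩
  · simp at h
  · have hm : ¬ (PySem.Int.mod (((p1 :: xs).length : Nat) : Int) 3 = 0) := by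
      rw [len_mod3]; exact h
    rw [show (p1 :: xs).length = xs.length + 1 from rfl, judgeA, if_pos hm]
    simp

-- ===== VERDICT (by name: the statement is the Claim_ definition above) =====
theorem judge_continue_spec : Claim_equal_judge_continue := by
  intro x _ hpre
  unfold Spec_judge_continue
  rcases hpre with hsorted | hbad
  · unfold judge_continue
    exact judgeA_eq x.length x le_rfl hsorted
  · exact judge_badlen x hbad
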